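-- pv_equiv track=rewrite | github.com/Rew725/Botsan2go | chunk.py | chunking
-- ===== SOURCE A (Python) =====
-- def chunking(word, num):
--     chunk_word = ''
--     chunk_num = ''
--     is_hit_list = [0] * 10
--     is_right_list = [1, 0, 0, 0, 0, 0, 1, 1, 1, 1]
--     is_right = is_right_list[num[0]]
--
--     # 狭義のチャンク化
--     for i in range(len(word)):
--         if is_hit_list[num[i]] == 1 or is_right != is_right_list[num[i]]:
--             # 同指打鍵または左右交互打鍵
--             chunk_word += '/'
--             chunk_num += '/'
--             is_hit_list = [0] * 10
--             is_right = is_right_list[num[i]]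
--         is_hit_list[num[i]] = 1
--         chunk_word += word[i]
--         chunk_num += str(num[i])
--
--     # 広義のチャンク化
--     # 左から右
--     word_from_left = ''
--     for i in range(len(chunk_word)):
--         if chunk_word[i] == '/':
--             if is_right_list[int(chunk_num[i - 1])] == 0 and is_right_list[int(chunk_num[i + 1])] == 1:
--                 continue
--         # '/'でない時も'/'が条件を満たさない時も追加する
--         word_from_left += chunk_word[i]
--     # 右から左
--     word_from_right = ''
--     for i in range(len(chunk_word)):
--         if chunk_word[i] == '/':
--             if is_right_list[int(chunk_num[i - 1])] == 1 and is_right_list[int(chunk_num[i + 1])] == 0: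
--                 continue
--         # '/'でない時も'/'が条件を満たさない時も追加する
--         word_from_right += chunk_word[i]
--
--     # 同指打鍵の'/'でlist化して1.チャンク数が少ない方を選択2.分散が小さい方を選択3.末尾の子音が少ない方を選択
--     return word_from_left, word_from_right
-- ===== SOURCE B (Python) =====
-- def chunking(word, num):
--     is_right_list = [1, 0, 0, 0, 0, 0, 1, 1, 1, 1]
--     cur_right = is_right_list[num[0]]
--     # one pass: build segments (substring, finger list), starting a new
--     # segment exactly where A inserts '/'
--     segments = []
--     cur_word = ''
--     cur_fingers = []
--     hit = set()
--     for ch, f in zip(word, num):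
--         if f in hit or is_right_list[f] != cur_right:
--             segments.append((cur_word, cur_fingers))
--             cur_word = ''
--             cur_fingers = []
--             hit = set()
--             cur_right = is_right_list[f]
--         hit.add(f)
--         cur_word += ch
--         cur_fingers.append(f)
--     segments.append((cur_word, cur_fingers))
--     # join the segments, dropping the separator on a left->right (resp.
--     # right->left) hand transition
--     word_from_left = segments[0][0]
--     word_from_right = segments[0][0]
--     for prev, cur in zip(segments, segments[1:]):
--         prev_hand = is_right_list[prev[1][-1]]
--         next_hand = is_right_list[cur[1][0]]
--         word_from_left += ('' if prev_hand == 0 and next_hand == 1 else '/') + cur[0]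
--         word_from_right += ('' if prev_hand == 1 and next_hand == 0 else '/') + cur[0]
--     return word_from_left, word_from_right
-- ===== Notes on version B (the rewrite author's own statement) =====
-- stated objective: simpler
-- what changed: B builds a list of (substring, finger-list) segments in one pass and joins them with conditional separators read off each segment's boundary fingers, instead of A's flat '/'-interleaved chunk strings re-scanned twice by index with int(chunk_num[i-1])/int(chunk_num[i+1]) re-parsing.
-- outside the precondition, e.g. on chunking('/ab', [2, 3, 8]): A returns ('/ab', 'a/b'), B returns ('/ab', '/a/b'); on chunking('a/b', [2, 3, 4]): A returns ('a/b', 'a/b'), B returns ('a/b', 'a/b'); on chunking('bcb', [-7, -5, 6, 4]): A returns ('bc/b', 'bcb'), B returns ('bcb', 'bc/b')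
import Mathlib
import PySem

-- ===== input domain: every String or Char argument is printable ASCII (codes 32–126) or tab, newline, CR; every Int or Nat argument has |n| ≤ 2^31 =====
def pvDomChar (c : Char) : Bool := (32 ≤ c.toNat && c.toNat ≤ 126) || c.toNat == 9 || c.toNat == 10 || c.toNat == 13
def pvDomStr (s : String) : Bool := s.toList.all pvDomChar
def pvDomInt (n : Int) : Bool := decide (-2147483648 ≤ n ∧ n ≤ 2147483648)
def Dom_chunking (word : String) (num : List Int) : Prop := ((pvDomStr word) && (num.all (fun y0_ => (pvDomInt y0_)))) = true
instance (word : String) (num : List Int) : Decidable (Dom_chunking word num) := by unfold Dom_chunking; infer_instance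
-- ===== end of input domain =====

-- B replaces A's flat '/'-interleaved chunk strings (re-scanned twice by index, re-parsing
-- int(chunk_num[i±1])) by a one-pass list of (substring, fingers) segments joined with
-- conditional separators — same return value on Pre_, simpler structure.

-- ===== PORT A =====
-- is_right_list (shared constant of both Pythons)
def rlist : List Int := [1, 0, 0, 0, 0, 0, 1, 1, 1, 1]
-- is_right_list[f]; pyGet? is exact (none = IndexError, Pre_ keeps f in -10..9)
def rl (f : Int) : Int := (PySem.List.pyGet? rlist f).getD 0
-- int(c) on a one-character string; exact where Python returns (none = ValueError, unreached under Pre_)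
def int1 (c : Char) : Int := (PySem.Int.ofChars? [c]).getD 0
-- is_hit_list[num[i]] = 1; exact in range (Pre_ keeps the index in -10..9)
def hitSet1 (hit : List Int) (f : Int) : List Int := (PySem.List.pySet? hit f 1).getD hit

-- one step of A's first loop; state (chunk_word, chunk_num, is_hit_list, is_right)
def chunkStep (st : List Char × List Char × List Int × Int) (p : Char × Int) :
    List Char × List Char × List Int × Int :=
  let (cw, cn, hit, ir) := st
  let (cw, cn, hit, ir) :=
    if (PySem.List.pyGet? hit p.2).getD 0 == 1 || ir != rl p.2 then
      (cw ++ ['/'], cn ++ ['/'], List.replicate 10 0, rl p.2)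
    else (cw, cn, hit, ir)
  (cw ++ [p.1], cn ++ PySem.Int.toChars p.2, hitSet1 hit p.2, ir)

-- A's second and third loops ('for i in range(len(chunk_word))'), keeping chunk_word[i]
-- unless it is '/' with hands (a, b) around it; a = b = read via int(chunk_num[i∓1])
def keepLoop (cw cn : List Char) (a b : Int) : List Char :=
  (PySem.List.pyRange 0 (cw.length : Int) 1).foldl (fun acc i =>
    if (PySem.List.pyGet? cw i).getD ' ' == '/'
        && rl (int1 ((PySem.List.pyGet? cn (i - 1)).getD '0')) == a
        && rl (int1 ((PySem.List.pyGet? cn (i + 1)).getD '0')) == b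
    then acc else acc ++ [(PySem.List.pyGet? cw i).getD ' ']) []

def chunking (word : String) (num : List Int) : String × String :=
  -- 'for i in range(len(word))' reading word[i], num[i]: under Pre_ (len word ≤ len num) exactly the zip
  let st := (word.toList.zip num).foldl chunkStep
    ([], [], List.replicate 10 0, rl ((PySem.List.pyGet? num 0).getD 0))
  (String.ofList (keepLoop st.1 st.2.1 0 1), String.ofList (keepLoop st.1 st.2.1 1 0))

-- ===== PORT B =====
-- one step of B's loop; state (segments, cur_word, cur_fingers, hit, cur_right)
def altStep (st : List (List Char × List Int) × List Char × List Int × PySem.Set Int × Int)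
    (p : Char × Int) : List (List Char × List Int) × List Char × List Int × PySem.Set Int × Int :=
  let (segs, curW, curF, hit, curR) := st
  let (segs, curW, curF, hit, curR) :=
    if PySem.Set.contains hit p.2 || rl p.2 != curR then
      (segs ++ [(curW, curF)], [], [], PySem.Set.empty, rl p.2)
    else (segs, curW, curF, hit, curR)
  (segs, curW ++ [p.1], curF ++ [p.2], PySem.Set.add hit p.2, curR)

def chunking_alt (word : String) (num : List Int) : String × String :=
  let st := (word.toList.zip num).foldl altStep
    ([], [], [], PySem.Set.empty, rl ((PySem.List.pyGet? num 0).getD 0))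
  let segs := st.1 ++ [(st.2.1, st.2.2.1)]
  let first := ((PySem.List.pyGet? segs 0).getD ([], [])).1
  let out := (segs.zip segs.tail).foldl (fun (acc : List Char × List Char) pc =>
    let prevHand := rl ((PySem.List.pyGet? pc.1.2 (-1)).getD 0)
    let nextHand := rl ((PySem.List.pyGet? pc.2.2 0).getD 0)
    (acc.1 ++ (if prevHand == 0 && nextHand == 1 then [] else ['/']) ++ pc.2.1,
     acc.2 ++ (if prevHand == 1 && nextHand == 0 then [] else ['/']) ++ pc.2.1))
    (first, first)
  (String.ofList out.1, String.ofList out.2)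

-- ===== PRECONDITION & SPEC =====
-- Pre_ excludes inputs on which A raises (empty num, num shorter than word, an index
-- outside -10..9: IndexError) and, among inputs A returns on, words containing '/' and
-- negative fingers at positions below len(word): a '/' in the word is indistinguishable
-- from A's own separator (A raises ValueError on int('/') when it abuts a chunk break and
-- otherwise keeps or drops it by negative-index wraparound), and a negative finger wraps
-- is_right_list while str(n) misaligns chunk_num — accidental values of A's encoding.
-- (num[0], used only to seed is_right, may be any valid index -10..9.)
-- The second disjunct allows negative fingers (valid Python indices -10..9) when no
-- chunk break can occur (fingers pairwise distinct modulo 10 and all on one hand):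
-- there chunk_num is never read back and both programs return the word unchanged.
def Pre_chunking (word : String) (num : List Int) : Prop :=
  num ≠ [] ∧ word.toList.length ≤ num.length ∧ '/' ∉ word.toList ∧
    (∀ f ∈ num.take 1, -10 ≤ f ∧ f ≤ 9) ∧
    ((∀ f ∈ num.take word.toList.length, 0 ≤ f ∧ f ≤ 9) ∨
     ((∀ f ∈ num.take word.toList.length, -10 ≤ f ∧ f ≤ 9) ∧
      (num.take word.toList.length).Pairwise (fun x y => x % 10 ≠ y % 10) ∧
      (∀ f ∈ num.take word.toList.length, rl f = rl (num.headD 0))))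
instance (word : String) (num : List Int) : Decidable (Pre_chunking word num) := by
  unfold Pre_chunking; infer_instance

def pvWitness_chunking : String × List Int := ("hello", [2, 3, 4, 7, 8])

def Spec_chunking (word : String) (num : List Int) (out : String × String) : Prop := out = chunking_alt word num
instance (word : String) (num : List Int) (out : String × String) : Decidable (Spec_chunking word num out) := by unfold Spec_chunking; infer_instance

-- ===== CLAIM (what is proved, stated in full; the proofs are below) =====
def Claim_equal_chunking : Prop := ∀ (word : String) (num : List Int), Dom_chunking word num → Pre_chunking word num → Spec_chunking word num (chunking word num)

-- ===== LEMMAS AND PROOFS =====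

-- proof-side abbreviations
-- the digit string of a finger list (chunk_num without separators)
def dchars (fs : List Int) : List Char := fs.flatMap PySem.Int.toChars
-- A's is_hit_list as a function of B's hit set
def maskh (h : PySem.Set Int) : List Int := (List.range 10).map (fun j => if (j : Int) ∈ h then 1 else 0)
-- A's chunk_word / chunk_num as functions of B's (segments, current segment)
def renderW (segs : List (List Char × List Int)) (cur : List Char) : List Char :=
  segs.flatMap (fun s => s.1 ++ ['/']) ++ cur
def renderN (segs : List (List Char × List Int)) (curF : List Int) : List Char :=
  segs.flatMap (fun s => dchars s.2 ++ ['/']) ++ dchars curF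
-- B's state mapped to A's state
def theta (st : List (List Char × List Int) × List Char × List Int × PySem.Set Int × Int) :
    List Char × List Char × List Int × Int :=
  (renderW st.1 st.2.1, renderN st.1 st.2.2.1, maskh st.2.2.2.1, st.2.2.2.2)

-- a recursive form of A's second/third loop: prev chunk_num char, rest of chunk_word, rest of chunk_num
def goA (a b : Int) : Char → List Char → List Char → List Char
  | p, c :: cw, d :: cn =>
      (if c == '/' && rl (int1 p) == a && rl (int1 (cn.headD '0')) == b then [] else [c])
        ++ goA a b d cw cn
  | _, _, _ => []

-- a recursive form of B's join loop: g = last finger of the previous segment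
def jOne (a b : Int) : Int → List (List Char × List Int) → List Char
  | _, [] => []
  | g, s :: rest =>
      (if rl g == a && rl (s.2.headD 0) == b then [] else ['/']) ++ s.1 ++
        jOne a b (s.2.getLastD 0) rest

-- digit facts
lemma toChars_digit (f : Int) (h0 : 0 ≤ f) (h9 : f ≤ 9) :
    ∃ d : Char, PySem.Int.toChars f = [d] ∧ int1 d = f ∧ d ≠ '/' := by
  interval_cases f
  exacts [⟨'0', by decide⟩, ⟨'1', by decide⟩, ⟨'2', by decide⟩, ⟨'3', by decide⟩,
    ⟨'4', by decide⟩, ⟨'5', by decide⟩, ⟨'6', by decide⟩, ⟨'7', by decide⟩,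
    ⟨'8', by decide⟩, ⟨'9', by decide⟩]

lemma dchars_nil : dchars [] = [] := rfl
lemma dchars_cons (f : Int) (fs : List Int) : dchars (f :: fs) = PySem.Int.toChars f ++ dchars fs := rfl
lemma dchars_length (fs : List Int) (h : ∀ f ∈ fs, 0 ≤ f ∧ f ≤ 9) :
    (dchars fs).length = fs.length := by
  induction fs with
  | nil => rfl
  | cons f fs ih =>
    obtain ⟨d, hd, -, -⟩ := toChars_digit f (h f (by simp)).1 (h f (by simp)).2
    simp [dchars_cons, hd, ih (fun g hg => h g (by simp [hg]))]

lemma getLastD_irrel {A : Type} (l : List A) (h : l ≠ []) (a b : A) :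
    l.getLastD a = l.getLastD b := by
  rw [List.getLastD_eq_getLast?, List.getLastD_eq_getLast?]
  obtain ⟨y, hy⟩ := Option.isSome_iff_exists.1 (List.getLast?_isSome.2 h)
  simp [hy]

lemma dchars_ne_nil (fs : List Int) (h : ∀ f ∈ fs, 0 ≤ f ∧ f ≤ 9) (hne : fs ≠ []) :
    dchars fs ≠ [] := by
  intro hcon
  have := dchars_length fs h
  rw [hcon] at this
  exact hne (List.length_eq_zero_iff.1 this.symm)

lemma dchars_getLastD (fs : List Int) (h : ∀ f ∈ fs, 0 ≤ f ∧ f ≤ 9) (hne : fs ≠ []) (p : Char) :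
    int1 ((dchars fs).getLastD p) = fs.getLastD 0 ∧ (dchars fs).getLastD p ≠ '/' := by
  induction fs generalizing p with
  | nil => exact absurd rfl hne
  | cons f fs ih =>
    obtain ⟨d, hd, hd1, hd2⟩ := toChars_digit f (h f (by simp)).1 (h f (by simp)).2
    rw [dchars_cons, hd]
    simp only [List.singleton_append, List.getLastD_cons]
    rcases eq_or_ne fs [] with rfl | hfs
    · simpa [dchars_nil] using ⟨hd1, hd2⟩
    · have ihh := ih (fun g hg => h g (by simp [hg])) hfs d
      exact ⟨by rw [ihh.1]; exact getLastD_irrel fs hfs 0 f, ihh.2⟩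

-- mask facts
lemma maskh_empty : maskh PySem.Set.empty = List.replicate 10 0 := by decide

lemma maskh_length (h : PySem.Set Int) : (maskh h).length = 10 := by simp [maskh]

lemma maskh_getElem (h : PySem.Set Int) (j : Nat) (hj : j < (maskh h).length) :
    (maskh h)[j] = if (j : Int) ∈ h then 1 else 0 := by
  have hr : List.range 10 = [0,1,2,3,4,5,6,7,8,9] := by decide
  have hm : maskh h = [if (0:Int) ∈ h then 1 else 0, if (1:Int) ∈ h then 1 else 0,
      if (2:Int) ∈ h then 1 else 0, if (3:Int) ∈ h then 1 else 0, if (4:Int) ∈ h then 1 else 0,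
      if (5:Int) ∈ h then 1 else 0, if (6:Int) ∈ h then 1 else 0, if (7:Int) ∈ h then 1 else 0,
      if (8:Int) ∈ h then 1 else 0, if (9:Int) ∈ h then 1 else 0] := by
    rw [maskh, hr]; rfl
  have hj' : j < 10 := by simpa [maskh_length] using hj
  interval_cases j <;> simp [hm]

lemma maskh_get (h : PySem.Set Int) (f : Int) (h0 : 0 ≤ f) (h9 : f ≤ 9) :
    (PySem.List.pyGet? (maskh h) f).getD 0 = if f ∈ h then 1 else 0 := by
  rw [PySem.List.pyGet?_of_nonneg _ h0]
  rw [List.getElem?_eq_getElem (by rw [maskh_length]; omega)]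
  rw [Option.getD_some, maskh_getElem, Int.toNat_of_nonneg h0]

lemma maskh_set (h : PySem.Set Int) (f : Int) (h0 : 0 ≤ f) (h9 : f ≤ 9) :
    hitSet1 (maskh h) f = maskh (PySem.Set.add h f) := by
  have hft : f.toNat < (maskh h).length := by rw [maskh_length]; omega
  have hr : PySem.List.pySet? (maskh h) f 1 = some ((maskh h).set f.toNat 1) := by
    rw [(by exact (Int.toNat_of_nonneg h0).symm : f = (f.toNat : Int))]
    exact PySem.List.pySet?_natCast _ _ _ hft
  rw [hitSet1, hr, Option.getD_some]
  apply List.ext_getElem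
  · rw [List.length_set, maskh_length, maskh_length]
  · intro j hj hj2
    rw [List.getElem_set]
    rw [maskh_length] at hj2
    rcases eq_or_ne j f.toNat with rfl | hne
    · rw [if_pos rfl, maskh_getElem,
        if_pos ((PySem.Set.mem_add h f _).2 (Or.inr (by rw [Int.toNat_of_nonneg h0])))]
    · rw [if_neg (fun hh => hne hh.symm), maskh_getElem, maskh_getElem]
      have hjf : (j : Int) ≠ f := by omega
      by_cases hm : (j : Int) ∈ h
      · rw [if_pos hm, if_pos ((PySem.Set.mem_add h f _).2 (Or.inl hm))]
      · rw [if_neg hm, if_neg (fun hc => by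
          rcases (PySem.Set.mem_add h f _).1 hc with hx | hx; exacts [hm hx, hjf hx])]

-- the two break conditions compute the same Bool
lemma cond_eq (h : PySem.Set Int) (r f : Int) (h0 : 0 ≤ f) (h9 : f ≤ 9) :
    ((PySem.List.pyGet? (maskh h) f).getD 0 == 1 || r != rl f)
      = (PySem.Set.contains h f || rl f != r) := by
  rw [maskh_get h f h0 h9]
  have hb : (r != rl f) = (rl f != r) := by simp [bne_comm]
  by_cases hm : f ∈ h
  · simp [hm]
  · have hc : PySem.Set.contains h f = false := by
      rw [← Bool.not_eq_true, PySem.Set.contains_iff]; exact hm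
    simp [hm, hb]

-- phase 1: one step commutes with theta
lemma step_comm (st : List (List Char × List Int) × List Char × List Int × PySem.Set Int × Int)
    (p : Char × Int) (h0 : 0 ≤ p.2) (h9 : p.2 ≤ 9) :
    chunkStep (theta st) p = theta (altStep st p) := by
  obtain ⟨segs, curW, curF, h, r⟩ := st
  simp only [chunkStep, altStep, theta, renderW, renderN]
  rw [cond_eq h r p.2 h0 h9]
  by_cases hc : (PySem.Set.contains h p.2 || rl p.2 != r) = true
  · simp only [hc, if_true]
    refine Prod.ext ?_ (Prod.ext ?_ (Prod.ext ?_ rfl))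
    · simp [List.append_assoc]
    · simp [dchars, List.append_assoc]
    · rw [← maskh_empty, maskh_set _ _ h0 h9]
  · simp only [Bool.not_eq_true] at hc
    simp only [hc, Bool.false_eq_true, if_false]
    refine Prod.ext ?_ (Prod.ext ?_ (Prod.ext ?_ rfl))
    · simp [List.append_assoc]
    · simp [dchars, List.append_assoc]
    · rw [maskh_set _ _ h0 h9]

lemma fold_comm (pairs : List (Char × Int))
    (hp : ∀ p ∈ pairs, 0 ≤ p.2 ∧ p.2 ≤ 9) :
    ∀ st, pairs.foldl chunkStep (theta st) = theta (pairs.foldl altStep st) := by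
  induction pairs with
  | nil => intro st; rfl
  | cons p ps ih =>
    intro st
    simp only [List.foldl_cons]
    rw [step_comm st p (hp p (by simp)).1 (hp p (by simp)).2]
    exact ih (fun q hq => hp q (by simp [hq])) _

-- invariant of B's fold
def SegOk (s : List Char × List Int) : Prop :=
  s.1.length = s.2.length ∧ (∀ c ∈ s.1, c ≠ '/') ∧ (∀ f ∈ s.2, 0 ≤ f ∧ f ≤ 9)

def InvB (st : List (List Char × List Int) × List Char × List Int × PySem.Set Int × Int) : Prop :=
  (∀ s ∈ st.1, SegOk s ∧ s.1 ≠ []) ∧ SegOk (st.2.1, st.2.2.1) ∧ st.2.1 ≠ []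

lemma invB_step (st : List (List Char × List Int) × List Char × List Int × PySem.Set Int × Int)
    (p : Char × Int) (hc : p.1 ≠ '/') (h0 : 0 ≤ p.2) (h9 : p.2 ≤ 9) (h : InvB st) :
    InvB (altStep st p) := by
  obtain ⟨segs, curW, curF, hset, r⟩ := st
  obtain ⟨hsegs, hcur, hne⟩ := h
  simp only [altStep]
  by_cases hb : (PySem.Set.contains hset p.2 || rl p.2 != r) = true
  · simp only [hb, if_true]
    refine ⟨?_, ⟨by simp, ?_, ?_⟩, by simp⟩
    · intro s hs
      rcases List.mem_append.1 hs with hs | hs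
      · exact hsegs s hs
      · simp at hs; subst hs; exact ⟨hcur, hne⟩
    · intro x hx; simp at hx; subst hx; exact hc
    · intro f hf; simp at hf; subst hf; exact ⟨h0, h9⟩
  · simp only [Bool.not_eq_true] at hb
    simp only [hb, Bool.false_eq_true, if_false]
    refine ⟨hsegs, ⟨by simp [hcur.1], ?_, ?_⟩, by simp⟩
    · intro x hx
      rcases List.mem_append.1 hx with hx | hx
      · exact hcur.2.1 x hx
      · simp at hx; subst hx; exact hc
    · intro f hf
      rcases List.mem_append.1 hf with hf | hf
      · exact hcur.2.2 f hf
      · simp at hf; subst hf; exact ⟨h0, h9⟩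

lemma invB_fold (pairs : List (Char × Int))
    (hp : ∀ p ∈ pairs, p.1 ≠ '/' ∧ 0 ≤ p.2 ∧ p.2 ≤ 9) :
    ∀ st, InvB st → InvB (pairs.foldl altStep st) := by
  induction pairs with
  | nil => intro st h; exact h
  | cons p ps ih =>
    intro st h
    exact ih (fun q hq => hp q (by simp [hq])) _
      (invB_step st p (hp p (by simp)).1 (hp p (by simp)).2.1 (hp p (by simp)).2.2 h)

-- phase 2, step 1: the indexed loop is a Nat-indexed fold over (prev :: cn)
lemma keep_eq_fold (cw cn : List Char) (a b : Int) :
    keepLoop cw cn a b =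
      (List.range cw.length).foldl (fun acc k =>
        if (cw[k]?.getD ' ') == '/'
            && rl (int1 (((((PySem.List.pyGet? cn (-1)).getD '0') :: cn))[k]?.getD '0')) == a
            && rl (int1 (((((PySem.List.pyGet? cn (-1)).getD '0') :: cn))[k + 2]?.getD '0')) == b
        then acc else acc ++ [cw[k]?.getD ' ']) [] := by
  unfold keepLoop
  rw [PySem.List.pyRange_one, List.foldl_map]
  simp only [sub_zero, Int.toNat_natCast]
  apply PySem.List.foldl_congr_mem
  intro acc k hk
  have hcw : PySem.List.pyGet? cw (0 + (k : Int)) = cw[k]? := by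
    rw [zero_add, PySem.List.pyGet?_natCast]
  have hnext : PySem.List.pyGet? cn (0 + (k : Int) + 1) = cn[k + 1]? := by
    rw [zero_add, (by push_cast; ring : (k : Int) + 1 = ((k + 1 : Nat) : Int)),
      PySem.List.pyGet?_natCast]
  have hnext' : ((((PySem.List.pyGet? cn (-1)).getD '0') :: cn))[k + 2]? = cn[k + 1]? :=
    List.getElem?_cons_succ ..
  rw [hcw, hnext, hnext']
  rcases k with _ | j
  · norm_num
  · have hprev : PySem.List.pyGet? cn (0 + ((j + 1 : Nat) : Int) - 1) = cn[j]? := by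
      rw [zero_add, (by push_cast; ring : ((j + 1 : Nat) : Int) - 1 = (j : Int)),
        PySem.List.pyGet?_natCast]
    rw [hprev, List.getElem?_cons_succ]

-- phase 2, step 2: that fold is the structural recursion goA
lemma fold_eq_goA (a b : Int) : ∀ (cw cn : List Char) (p : Char) (acc : List Char),
    cw.length = cn.length →
    (List.range cw.length).foldl (fun acc k =>
        if (cw[k]?.getD ' ') == '/'
            && rl (int1 ((p :: cn)[k]?.getD '0')) == a
            && rl (int1 ((p :: cn)[k + 2]?.getD '0')) == b
        then acc else acc ++ [cw[k]?.getD ' ']) acc = acc ++ goA a b p cw cn := by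
  intro cw
  induction cw with
  | nil =>
    intro cn p acc hlen
    simp [goA]
  | cons c cw' ih =>
    intro cn p acc hlen
    cases cn with
    | nil => simp at hlen
    | cons d cn' =>
      rw [List.length_cons, List.range_succ_eq_map, List.foldl_cons, List.foldl_map]
      have hstep :
          (if (((c :: cw')[0]?.getD ' ') == '/')
              && rl (int1 ((p :: d :: cn')[0]?.getD '0')) == a
              && rl (int1 ((p :: d :: cn')[0 + 2]?.getD '0')) == b
          then acc else acc ++ [(c :: cw')[0]?.getD ' '])
            = acc ++ (if (c == '/') && rl (int1 p) == a && rl (int1 (cn'.headD '0')) == b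
                then [] else [c]) := by
        simp only [List.getElem?_cons_zero, Option.getD_some]
        have h2 : (p :: d :: cn')[0 + 2]?.getD '0' = cn'.headD '0' := by
          cases cn' <;> simp
        rw [h2]
        cases hB : ((c == '/') && rl (int1 p) == a && rl (int1 (cn'.headD '0')) == b) <;>
          simp
      have hbody : ∀ (acc2 : List Char) (k : Nat),
          (if (((c :: cw')[k.succ]?.getD ' ') == '/')
              && rl (int1 ((p :: d :: cn')[k.succ]?.getD '0')) == a
              && rl (int1 ((p :: d :: cn')[k.succ + 2]?.getD '0')) == b
          then acc2 else acc2 ++ [(c :: cw')[k.succ]?.getD ' '])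
            = (if ((cw'[k]?.getD ' ') == '/')
              && rl (int1 ((d :: cn')[k]?.getD '0')) == a
              && rl (int1 ((d :: cn')[k + 2]?.getD '0')) == b
          then acc2 else acc2 ++ [cw'[k]?.getD ' ']) := by
        intro acc2 k
        have e1 : (c :: cw')[k.succ]? = cw'[k]? := List.getElem?_cons_succ ..
        have e2 : (p :: d :: cn')[k.succ]? = (d :: cn')[k]? := List.getElem?_cons_succ ..
        have e3 : (p :: d :: cn')[k.succ + 2]? = (d :: cn')[k + 2]? := by
          show (p :: d :: cn')[(k + 2) + 1]? = _
          exact List.getElem?_cons_succ ..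
        rw [e1, e2, e3]
      calc _ = (List.range cw'.length).foldl (fun acc2 k =>
              if ((cw'[k]?.getD ' ') == '/')
                  && rl (int1 ((d :: cn')[k]?.getD '0')) == a
                  && rl (int1 ((d :: cn')[k + 2]?.getD '0')) == b
              then acc2 else acc2 ++ [cw'[k]?.getD ' '])
            (acc ++ (if (c == '/') && rl (int1 p) == a && rl (int1 (cn'.headD '0')) == b
                then [] else [c])) := by
            rw [hstep]
            exact PySem.List.foldl_congr_mem _ _ _ _ (fun acc2 k _ => hbody acc2 k)
        _ = _ := by
            rw [ih cn' d _ (by simpa using hlen), goA, List.append_assoc]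

lemma keep_eq_goA (cw cn : List Char) (a b : Int) (h : cw.length = cn.length) :
    keepLoop cw cn a b = goA a b ((PySem.List.pyGet? cn (-1)).getD '0') cw cn := by
  rw [keep_eq_fold, fold_eq_goA a b cw cn _ [] h]; rfl

-- goA copies a slash-free block, updating prev to the block's last chunk_num char
lemma goA_copy (a b : Int) : ∀ (w n : List Char) (p : Char) (w' n' : List Char),
    w.length = n.length → (∀ c ∈ w, c ≠ '/') →
    goA a b p (w ++ w') (n ++ n') = w ++ goA a b (n.getLastD p) w' n' := by
  intro w
  induction w with
  | nil =>
    intro n p w' n' hlen _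
    rw [List.length_nil] at hlen
    rw [List.eq_nil_of_length_eq_zero hlen.symm]
    simp
  | cons c w ih =>
    intro n p w' n' hlen hsl
    cases n with
    | nil => simp at hlen
    | cons d n =>
      have hc : (c == '/') = false := by
        simpa using hsl c (by simp)
      simp only [List.cons_append, goA, hc, Bool.false_and, Bool.false_eq_true, if_false]
      rw [ih n d w' n' (by simpa using hlen) (fun x hx => hsl x (by simp [hx]))]
      simp only [List.nil_append, List.getLastD_cons]

-- goA over the '/'-prefixed rendering of segments is jOne
lemma goA_slash (a b : Int) : ∀ (ss : List (List Char × List Int)) (p : Char) (g : Int),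
    (∀ s ∈ ss, SegOk s ∧ s.2 ≠ []) → int1 p = g → p ≠ '/' →
    goA a b p (ss.flatMap (fun s => '/' :: s.1)) (ss.flatMap (fun s => '/' :: dchars s.2))
      = jOne a b g ss := by
  intro ss
  induction ss with
  | nil => intro p g _ _ _; rfl
  | cons s rest ih =>
    intro p g hok hint hpn
    obtain ⟨⟨hlen, hsl, hdig⟩, hne⟩ := hok s (by simp)
    obtain ⟨f0, fs, hf⟩ := List.exists_cons_of_ne_nil hne
    have hdig0 := hdig f0 (by simp [hf])
    obtain ⟨d0, hd0, hd0i, _⟩ := toChars_digit f0 hdig0.1 hdig0.2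
    have hhead : ((dchars s.2 ++ rest.flatMap (fun s => '/' :: dchars s.2)).headD '0') = d0 := by
      rw [hf, dchars_cons, hd0]; simp
    have hheadf : s.2.headD 0 = f0 := by rw [hf]; rfl
    have hdne : dchars s.2 ≠ [] := dchars_ne_nil s.2 hdig (by rw [hf]; simp)
    have hlast := dchars_getLastD s.2 hdig (by rw [hf]; simp) '/'
    simp only [List.flatMap_cons, List.cons_append, goA]
    have hcondL : ((('/' : Char) == '/')
        && rl (int1 p) == a
        && rl (int1 ((dchars s.2 ++ rest.flatMap (fun s => '/' :: dchars s.2)).headD '0')) == b)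
        = (rl g == a && rl (s.2.headD 0) == b) := by
      rw [hhead, hd0i, hint, hheadf]; simp
    rw [hcondL]
    rw [goA_copy a b s.1 (dchars s.2) '/' _ _ (by rw [dchars_length s.2 hdig]; exact hlen)
      hsl]
    rw [ih ((dchars s.2).getLastD '/') (s.2.getLastD 0)
      (fun t ht => hok t (by simp [ht])) hlast.1 hlast.2]
    rw [jOne]
    rw [List.append_assoc]

-- '/'-shift: pull the leading separator of each block to the front
lemma shift_slash (g : (List Char × List Int) → List Char) :
    ∀ (ss : List (List Char × List Int)) (c : List Char),
    '/' :: (ss.flatMap (fun s => g s ++ ['/']) ++ c)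
      = ss.flatMap (fun s => '/' :: g s) ++ ('/' :: c) := by
  intro ss
  induction ss with
  | nil => intro c; simp
  | cons s rest ih =>
    intro c
    simp only [List.flatMap_cons, List.cons_append, List.append_assoc, List.nil_append]
    rw [ih c]

-- B's join fold equals first ++ jOne
lemma jOne_eq_zip (a b : Int) :
    ∀ (rest : List (List Char × List Int)) (prev : List Char × List Int) (acc : List Char),
    ((prev :: rest).zip rest).foldl (fun acc pc =>
        acc ++ (if rl ((PySem.List.pyGet? pc.1.2 (-1)).getD 0) == a
                    && rl ((PySem.List.pyGet? pc.2.2 0).getD 0) == b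
                then [] else ['/']) ++ pc.2.1) acc
      = acc ++ jOne a b (prev.2.getLastD 0) rest := by
  intro rest
  induction rest with
  | nil => intro prev acc; simp [jOne]
  | cons s rest ih =>
    intro prev acc
    rw [List.zip_cons_cons, List.foldl_cons, ih s, jOne]
    have h1 : (PySem.List.pyGet? prev.2 (-1)).getD 0 = prev.2.getLastD 0 := by
      rw [PySem.List.pyGet?_neg_one, ← List.getLastD_eq_getLast?]
    have h2 : (PySem.List.pyGet? s.2 0).getD 0 = s.2.headD 0 := by
      rw [PySem.List.pyGet?_zero, List.headD_eq_head?, List.head?_eq_getElem?]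
    rw [h1, h2]
    simp [List.append_assoc]

-- assembled: for a well-formed B state, A's keep loop equals B's join, one side at a time
lemma flat_len (ss : List (List Char × List Int)) (h : ∀ s ∈ ss, SegOk s) :
    (ss.flatMap (fun s => '/' :: s.1)).length = (ss.flatMap (fun s => '/' :: dchars s.2)).length := by
  induction ss with
  | nil => rfl
  | cons s rest ih =>
    have hs := h s (by simp)
    simp only [List.flatMap_cons, List.length_append, List.length_cons]
    rw [ih (fun t ht => h t (by simp [ht])), dchars_length s.2 hs.2.2, hs.1]

lemma render_as_flat (S' : List (List Char × List Int)) (s0 : List Char × List Int)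
    (W : List Char) (F : List Int) :
    renderW (s0 :: S') W = s0.1 ++ (S' ++ [(W, F)]).flatMap (fun s => '/' :: s.1)
    ∧ renderN (s0 :: S') F = dchars s0.2 ++ (S' ++ [(W, F)]).flatMap (fun s => '/' :: dchars s.2) := by
  constructor
  · rw [renderW, List.flatMap_cons, List.flatMap_append]
    simp only [List.flatMap_cons, List.flatMap_nil, List.append_nil, List.append_assoc,
      List.singleton_append]
    exact congrArg (fun x => s0.1 ++ x) (shift_slash (fun s => s.1) S' W)
  · rw [renderN, List.flatMap_cons, List.flatMap_append]
    simp only [List.flatMap_cons, List.flatMap_nil, List.append_nil, List.append_assoc,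
      List.singleton_append]
    exact congrArg (fun x => dchars s0.2 ++ x) (shift_slash (fun s => dchars s.2) S' (dchars F))

lemma keep_eq_join (a b : Int) (S : List (List Char × List Int)) (W : List Char) (F : List Int)
    (hS : ∀ s ∈ S, (SegOk s ∧ s.1 ≠ [])) (hcur : SegOk (W, F)) (hWne : W ≠ [] ∨ S = []) :
    keepLoop (renderW S W) (renderN S F) a b
      = ((S ++ [(W, F)]).zip (S ++ [(W, F)]).tail).foldl (fun acc pc =>
          acc ++ (if rl ((PySem.List.pyGet? pc.1.2 (-1)).getD 0) == a
                      && rl ((PySem.List.pyGet? pc.2.2 0).getD 0) == b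
                  then [] else ['/']) ++ pc.2.1)
          ((PySem.List.pyGet? (S ++ [(W, F)]) 0).getD ([], [])).1 := by
  have hWd : W.length = (dchars F).length := by
    rw [dchars_length F hcur.2.2]; exact hcur.1
  cases S with
  | nil =>
    have hrW : renderW [] W = W := by simp [renderW]
    have hrN : renderN [] F = dchars F := by simp [renderN]
    rw [hrW, hrN, keep_eq_goA _ _ a b hWd]
    have := goA_copy a b W (dchars F)
      ((PySem.List.pyGet? (dchars F) (-1)).getD '0') [] [] hWd hcur.2.1
    simp only [List.append_nil] at this
    rw [this]
    simp [goA]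
  | cons s0 S' =>
    have hW : W ≠ [] := by
      rcases hWne with h | h
      · exact h
      · simp at h
    have hs0 := hS s0 (by simp)
    have hs0f : s0.2 ≠ [] := by
      intro hcon
      have := hs0.1.1
      rw [hcon] at this
      simp at this
      exact hs0.2 this
    have hFne : F ≠ [] := by
      intro hcon
      have := hcur.1
      rw [hcon] at this
      simp at this
      exact hW this
    obtain ⟨hrW, hrN⟩ := render_as_flat S' s0 W F
    have hok : ∀ t ∈ S' ++ [(W, F)], SegOk t ∧ t.2 ≠ [] := by
      intro t ht
      rcases List.mem_append.1 ht with ht | ht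
      · have h1 := hS t (by simp [ht])
        refine ⟨h1.1, fun hcon => h1.2 ?_⟩
        have := h1.1.1
        rw [hcon] at this
        simpa using this
      · simp at ht; subst ht; exact ⟨hcur, hFne⟩
    have hlen : (renderW (s0 :: S') W).length = (renderN (s0 :: S') F).length := by
      rw [hrW, hrN, List.length_append, List.length_append,
        dchars_length s0.2 hs0.1.2.2, hs0.1.1,
        flat_len (S' ++ [(W, F)]) (fun t ht => (hok t ht).1)]
    rw [keep_eq_goA _ _ a b hlen, hrW, hrN]
    have hlast := dchars_getLastD s0.2 hs0.1.2.2 hs0f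
      ((PySem.List.pyGet? (dchars s0.2 ++ (S' ++ [(W, F)]).flatMap (fun s => '/' :: dchars s.2))
        (-1)).getD '0')
    rw [goA_copy a b s0.1 (dchars s0.2) _ _ _
      (by rw [dchars_length s0.2 hs0.1.2.2]; exact hs0.1.1) hs0.1.2.1]
    rw [goA_slash a b (S' ++ [(W, F)])
      ((dchars s0.2).getLastD
        ((PySem.List.pyGet? (dchars s0.2 ++ (S' ++ [(W, F)]).flatMap (fun s => '/' :: dchars s.2))
          (-1)).getD '0'))
      (s0.2.getLastD 0) hok hlast.1 hlast.2]
    have hfirst : ((PySem.List.pyGet? (s0 :: (S' ++ [(W, F)])) 0).getD ([], [])).1 = s0.1 := by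
      rw [PySem.List.pyGet?_zero_cons]; rfl
    rw [List.cons_append, List.tail_cons, hfirst,
      jOne_eq_zip a b (S' ++ [(W, F)]) s0 s0.1]

-- wrap-around variants of the mask lemmas (negative Python index -10..-1 reads slot f+10)
lemma maskh_get_wrap (h : PySem.Set Int) (f : Int) (h0 : -10 ≤ f) (h9 : f ≤ 9) :
    (PySem.List.pyGet? (maskh h) f).getD 0 = if f % 10 ∈ h then 1 else 0 := by
  rcases le_or_gt 0 f with hf | hf
  · rw [maskh_get h f hf h9, (by omega : f % 10 = f)]
  · have hk : f = -(((-f).toNat : Nat) : Int) := by omega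
    have h1 : (0:Nat) < (-f).toNat := by omega
    have h2 : (-f).toNat ≤ (maskh h).length := by rw [maskh_length]; omega
    rw [hk, PySem.List.pyGet?_neg_natCast (maskh h) (-f).toNat h1 h2]
    have h3 : (maskh h).length - (-f).toNat < (maskh h).length := by rw [maskh_length]; omega
    rw [List.getElem?_eq_getElem h3, Option.getD_some, maskh_getElem]
    have h4 : (((maskh h).length - (-f).toNat : Nat) : Int) = f % 10 := by
      rw [maskh_length]; omega
    rw [h4, (by omega : -(((-f).toNat : Nat) : Int) % 10 = f % 10)]

lemma pyIdx_wrap (n : Nat) (f : Int) (hn : n = 10) (h0 : -10 ≤ f) (h9 : f ≤ 9) :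
    PySem.List.pyIdx? n f = some (f % 10).toNat := by
  subst hn
  unfold PySem.List.pyIdx?
  split
  · rw [if_pos (by omega)]
    congr 1
    omega
  · rw [if_pos (by omega)]
    congr 1
    omega

lemma maskh_set_wrap (h : PySem.Set Int) (f : Int) (h0 : -10 ≤ f) (h9 : f ≤ 9) :
    hitSet1 (maskh h) f = maskh (PySem.Set.add h (f % 10)) := by
  have hidx := pyIdx_wrap (maskh h).length f (maskh_length h) h0 h9
  have hidx2 := pyIdx_wrap (maskh h).length (f % 10) (maskh_length h) (by omega) (by omega)
  have hmod : (f % 10) % 10 = f % 10 := by omega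
  rw [hmod] at hidx2
  have heq : hitSet1 (maskh h) f = hitSet1 (maskh h) (f % 10) := by
    simp only [hitSet1, PySem.List.pySet?, hidx, hidx2]
  rw [heq]
  exact maskh_set h (f % 10) (by omega) (by omega)

-- A's first loop never breaks when the fingers are distinct mod 10 and on one hand
lemma noBreak_A : ∀ (pairs : List (Char × Int)) (cw cn : List Char) (h : PySem.Set Int) (r : Int),
    (∀ p ∈ pairs, (-10 ≤ p.2 ∧ p.2 ≤ 9) ∧ rl p.2 = r ∧ p.2 % 10 ∉ h) →
    pairs.Pairwise (fun p q => p.2 % 10 ≠ q.2 % 10) →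
    (pairs.foldl chunkStep (cw, cn, maskh h, r)).1 = cw ++ pairs.map (·.1) := by
  intro pairs
  induction pairs with
  | nil => intro cw cn h r _ _; simp
  | cons p rest ih =>
    intro cw cn h r hp hpw
    obtain ⟨⟨h0, h9⟩, hr, hs⟩ := hp p (by simp)
    have hcond : ((PySem.List.pyGet? (maskh h) p.2).getD 0 == 1 || r != rl p.2) = false := by
      rw [maskh_get_wrap h p.2 h0 h9, if_neg hs, hr]
      simp
    rw [List.foldl_cons]
    have hstep : chunkStep (cw, cn, maskh h, r) p
        = (cw ++ [p.1], cn ++ PySem.Int.toChars p.2, maskh (PySem.Set.add h (p.2 % 10)), r) := by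
      rw [chunkStep]
      simp only [hcond, Bool.false_eq_true, if_false]
      rw [maskh_set_wrap h p.2 h0 h9]
    rw [hstep, ih (cw ++ [p.1]) _ _ r ?_ (List.Pairwise.of_cons hpw)]
    · simp
    · intro q hq
      obtain ⟨hb, hrq, hsq⟩ := hp q (by simp [hq])
      refine ⟨hb, hrq, fun hc => ?_⟩
      rcases (PySem.Set.mem_add h (p.2 % 10) _).1 hc with hc | hc
      · exact hsq hc
      · exact (List.rel_of_pairwise_cons hpw hq) hc.symm

-- B's loop never breaks when the fingers are distinct and on one hand
lemma noBreak_B : ∀ (pairs : List (Char × Int)) (segs : List (List Char × List Int))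
    (curW : List Char) (curF : List Int) (h : PySem.Set Int) (r : Int),
    (∀ p ∈ pairs, p.2 ∉ h ∧ rl p.2 = r) →
    pairs.Pairwise (fun p q => p.2 ≠ q.2) →
    (pairs.foldl altStep (segs, curW, curF, h, r)).1 = segs ∧
      (pairs.foldl altStep (segs, curW, curF, h, r)).2.1 = curW ++ pairs.map (·.1) := by
  intro pairs
  induction pairs with
  | nil => intro segs curW curF h r _ _; simp
  | cons p rest ih =>
    intro segs curW curF h r hp hpw
    obtain ⟨hmem, hr⟩ := hp p (by simp)
    have hcond : (PySem.Set.contains h p.2 || rl p.2 != r) = false := by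
      have hc : PySem.Set.contains h p.2 = false := by
        rw [← Bool.not_eq_true, PySem.Set.contains_iff]; exact hmem
      rw [hc, hr]
      simp
    rw [List.foldl_cons]
    have hstep : altStep (segs, curW, curF, h, r) p
        = (segs, curW ++ [p.1], curF ++ [p.2], PySem.Set.add h p.2, r) := by
      rw [altStep]
      simp only [hcond, Bool.false_eq_true, if_false]
    rw [hstep]
    have hnext : ∀ q ∈ rest, q.2 ∉ PySem.Set.add h p.2 ∧ rl q.2 = r := by
      intro q hq
      obtain ⟨hmq, hrq⟩ := hp q (by simp [hq])
      refine ⟨fun hc => ?_, hrq⟩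
      rcases (PySem.Set.mem_add h p.2 _).1 hc with hc | hc
      · exact hmq hc
      · exact (List.rel_of_pairwise_cons hpw hq) hc.symm
    have hih := ih segs (curW ++ [p.1]) (curF ++ [p.2]) (PySem.Set.add h p.2) r hnext
      (List.Pairwise.of_cons hpw)
    exact ⟨hih.1, by rw [hih.2]; simp⟩

-- A's keep loops copy a slash-free chunk_word whole
lemma keep_all (cw cn : List Char) (a b : Int) (h : '/' ∉ cw) :
    keepLoop cw cn a b = cw := by
  unfold keepLoop
  have hcongr : ∀ (acc : List Char), ∀ i ∈ PySem.List.pyRange 0 (cw.length : Int) 1,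
      (if (PySem.List.pyGet? cw i).getD ' ' == '/'
          && rl (int1 ((PySem.List.pyGet? cn (i - 1)).getD '0')) == a
          && rl (int1 ((PySem.List.pyGet? cn (i + 1)).getD '0')) == b
      then acc else acc ++ [(PySem.List.pyGet? cw i).getD ' '])
        = acc ++ [(PySem.List.pyGet? cw i).getD ' '] := by
    intro acc i hi
    obtain ⟨hi0, hilen⟩ := (PySem.List.mem_pyRange_one).1 hi
    have hget : PySem.List.pyGet? cw i = some cw[i.toNat] :=
      PySem.List.pyGet?_eq_some_getElem cw hi0 (by omega)
    have hne : (cw[i.toNat] == '/') = false := by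
      simp only [beq_eq_false_iff_ne, ne_eq]
      intro hc
      exact h (hc ▸ List.getElem_mem _)
    rw [hget, Option.getD_some, hne]
    simp
  rw [PySem.List.foldl_congr_mem _ _ _ _ hcongr]
  exact (PySem.List.foldl_pyRange_zero_pyGetD' cw ' ' (fun acc x => acc ++ [x]) []).trans
    (PySem.List.foldl_append_singleton_eq_self cw []) |>.trans (by simp)

-- projections of a zip
lemma zip_map_fst : ∀ (l1 : List Char) (l2 : List Int), l1.length ≤ l2.length →
    (l1.zip l2).map (·.1) = l1 := by
  intro l1
  induction l1 with
  | nil => intro l2 _; rfl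
  | cons a l1 ih =>
    intro l2 hl
    cases l2 with
    | nil => simp at hl
    | cons b l2 =>
      rw [List.zip_cons_cons, List.map_cons, ih l2 (by simpa using hl)]

lemma zip_map_snd : ∀ (l1 : List Char) (l2 : List Int),
    (l1.zip l2).map (·.2) = l2.take l1.length := by
  intro l1
  induction l1 with
  | nil => intro l2; rfl
  | cons a l1 ih =>
    intro l2
    cases l2 with
    | nil => simp
    | cons b l2 =>
      rw [List.zip_cons_cons, List.map_cons, ih l2, List.length_cons, List.take_succ_cons]

-- zip members come from the take of the second list
lemma zip_snd_mem_take : ∀ (l1 : List Char) (l2 : List Int) (p : Char × Int),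
    p ∈ l1.zip l2 → p.2 ∈ l2.take l1.length := by
  intro l1
  induction l1 with
  | nil => intro l2 p hp; simp at hp
  | cons a l1 ih =>
    intro l2 p hp
    cases l2 with
    | nil => simp at hp
    | cons b l2 =>
      rw [List.zip_cons_cons] at hp
      rcases List.mem_cons.1 hp with rfl | hp
      · simp
      · rw [List.length_cons, List.take_succ_cons]
        exact List.mem_cons_of_mem b (ih l2 p hp)

-- ===== VERDICT (by name: the statement is the Claim_ definition above) =====
theorem chunking_spec : Claim_equal_chunking := by
  intro word num hdom hpre
  obtain ⟨hne, hlen, hslash, hr0, hrange⟩ := hpre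
  unfold Spec_chunking chunking chunking_alt
  cases hw : word.toList with
  | nil => rfl
  | cons c w' =>
    cases num with
    | nil => exact absurd rfl hne
    | cons f n' =>
      dsimp only []
      rw [hw] at hlen hslash hrange
      have hcurR : (PySem.List.pyGet? (f :: n') 0).getD 0 = f := by
        rw [PySem.List.pyGet?_zero_cons]; rfl
      rcases hrange with hrange | ⟨hb2, hpw2, hhand2⟩
      · -- all fingers 0..9: the two folds track each other through theta
        have hp : ∀ p ∈ (c :: w').zip (f :: n'), 0 ≤ p.2 ∧ p.2 ≤ 9 := by
          intro p hp
          exact hrange p.2 (zip_snd_mem_take (c :: w') (f :: n') p hp)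
        have hp' : ∀ p ∈ (c :: w').zip (f :: n'), p.1 ≠ '/' ∧ 0 ≤ p.2 ∧ p.2 ≤ 9 := by
          intro p hpm
          refine ⟨fun hcon => hslash ?_, hp p hpm⟩
          rw [← hcon]
          exact (List.of_mem_zip hpm).1
        have hinit : (([] : List Char), ([] : List Char), List.replicate 10 0,
            rl ((PySem.List.pyGet? (f :: n') 0).getD 0))
            = theta ([], [], [], PySem.Set.empty, rl ((PySem.List.pyGet? (f :: n') 0).getD 0)) := by
          refine Prod.ext rfl (Prod.ext rfl (Prod.ext ?_ rfl))
          exact maskh_empty.symm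
        have hA := fold_comm ((c :: w').zip (f :: n')) hp
          ([], [], [], PySem.Set.empty, rl ((PySem.List.pyGet? (f :: n') 0).getD 0))
        rw [← hinit] at hA
        have hst1 : altStep ([], [], [], PySem.Set.empty,
            rl ((PySem.List.pyGet? (f :: n') 0).getD 0)) (c, f)
            = ([], [c], [f], PySem.Set.add PySem.Set.empty f, rl f) := by
          rw [hcurR]
          simp [altStep]
        have hinv : InvB (((c :: w').zip (f :: n')).foldl altStep
            ([], [], [], PySem.Set.empty, rl ((PySem.List.pyGet? (f :: n') 0).getD 0))) := by
          rw [List.zip_cons_cons, List.foldl_cons, hst1]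
          refine invB_fold (w'.zip n') ?_ _ ?_
          · intro q hq
            refine (hp' q ?_)
            rw [List.zip_cons_cons]
            exact List.mem_cons_of_mem _ hq
          · refine ⟨by simp, ⟨rfl, ?_, ?_⟩, by simp⟩
            · intro x hx
              have hx' : x = c := by simpa using hx
              rw [hx']
              exact (hp' (c, f) (by rw [List.zip_cons_cons]; exact List.mem_cons_self ..)).1
            · intro y hy
              have hy' : y = f := by simpa using hy
              rw [hy']
              exact hp (c, f) (by rw [List.zip_cons_cons]; exact List.mem_cons_self ..)
        rw [hA]
        rw [PySem.List.foldl_prod_mk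
          (f := fun (acc : List Char) (pc : (List Char × List Int) × (List Char × List Int)) =>
            acc ++ (if rl ((PySem.List.pyGet? pc.1.2 (-1)).getD 0) == 0
                  && rl ((PySem.List.pyGet? pc.2.2 0).getD 0) == 1 then [] else ['/']) ++ pc.2.1)
          (g := fun (acc : List Char) (pc : (List Char × List Int) × (List Char × List Int)) =>
            acc ++ (if rl ((PySem.List.pyGet? pc.1.2 (-1)).getD 0) == 1
                  && rl ((PySem.List.pyGet? pc.2.2 0).getD 0) == 0 then [] else ['/']) ++ pc.2.1)]
        refine Prod.ext ?_ ?_ <;> dsimp only [theta]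
        · exact congrArg String.ofList
            (keep_eq_join 0 1 _ _ _ hinv.1 hinv.2.1 (Or.inl hinv.2.2))
        · exact congrArg String.ofList
            (keep_eq_join 1 0 _ _ _ hinv.1 hinv.2.1 (Or.inl hinv.2.2))
      · -- negative fingers, but pairwise distinct mod 10 and one hand: no break on either side
        have hhead : (f :: n').headD 0 = f := rfl
        rw [hhead] at hhand2
        have hpA : ∀ p ∈ (c :: w').zip (f :: n'),
            ((-10 ≤ p.2 ∧ p.2 ≤ 9) ∧ rl p.2 = rl ((PySem.List.pyGet? (f :: n') 0).getD 0)
              ∧ p.2 % 10 ∉ PySem.Set.empty) := by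
          intro p hpm
          have hmem := zip_snd_mem_take (c :: w') (f :: n') p hpm
          exact ⟨hb2 p.2 hmem, by rw [hcurR]; exact hhand2 p.2 hmem, by simp [PySem.Set.empty]⟩
        have hpwz : ((c :: w').zip (f :: n')).Pairwise (fun p q => p.2 % 10 ≠ q.2 % 10) := by
          have := (List.pairwise_map (f := fun p : Char × Int => p.2)).1
            (by rw [zip_map_snd]; exact hpw2)
          exact this
        have hA1 := noBreak_A ((c :: w').zip (f :: n')) [] [] PySem.Set.empty
          (rl ((PySem.List.pyGet? (f :: n') 0).getD 0)) hpA hpwz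
        have hB1 := noBreak_B ((c :: w').zip (f :: n')) [] [] [] PySem.Set.empty
          (rl ((PySem.List.pyGet? (f :: n') 0).getD 0))
          (fun p hpm => ⟨by simp [PySem.Set.empty], (hpA p hpm).2.1⟩)
          (hpwz.imp (fun {p q} hne heq => hne (by rw [heq])))
        rw [← maskh_empty]
        rw [hA1, hB1.1, hB1.2, zip_map_fst (c :: w') (f :: n') hlen]
        simp only [List.nil_append]
        rw [keep_all _ _ 0 1 hslash, keep_all _ _ 1 0 hslash, PySem.List.pyGet?_zero_cons]
        rfl
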